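-- pv_equiv track=rewrite | github.com/cpwoo/CodeTest | programmers/etc/level2/3xn_타일링.py | solution
-- ===== SOURCE A (Python) =====
-- MOD = 1_000_000_007
--
-- def solution(n):
--     answer = 0
--     dp = [0]*(n+1)
--     dp[2] = 3
--     dp[4] = 11
--     for i in range(6, n+1, 2):
--         dp[i] = (4*dp[i-2]-dp[i-4])%MOD
--     return dp[n]
-- ===== SOURCE B (Python) =====
-- MOD = 1_000_000_007
--
-- def solution(n):
--     # 3xn tiling count: at even widths n = 2k the counts satisfy f(0)=1, f(1)=3,
--     # f(k) = (4*f(k-1) - f(k-2)) % MOD; computed by binary exponentiation of the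
--     # 2x2 companion matrix mod MOD (O(log n) instead of A's O(n) table).
--     if n % 2 == 1:
--         return 0
--     k = n // 2
--
--     def mul(X, Y):
--         a, b, c, d = X
--         e, f, g, h = Y
--         return ((a * e + b * g) % MOD, (a * f + b * h) % MOD,
--                 (c * e + d * g) % MOD, (c * f + d * h) % MOD)
--
--     R = (1, 0, 0, 1)
--     P = (4, MOD - 1, 1, 0)
--     e = k - 1
--     while e > 0:
--         if e % 2:
--             R = mul(R, P)
--         P = mul(P, P)
--         e //= 2
--     # (f(k), f(k-1)) = R @ (f(1), f(0))
--     return (R[0] * 3 + R[1] * 1) % MOD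
-- ===== Notes on version B (the rewrite author's own statement) =====
-- stated objective: faster
-- what changed: Replaces the O(n) DP table over all widths with binary exponentiation of the 2x2 companion matrix of the even-width recurrence f(k)=(4f(k-1)-f(k-2)) mod 1e9+7, so the answer is computed in O(log n) multiplications and O(1) memory.
import Mathlib
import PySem

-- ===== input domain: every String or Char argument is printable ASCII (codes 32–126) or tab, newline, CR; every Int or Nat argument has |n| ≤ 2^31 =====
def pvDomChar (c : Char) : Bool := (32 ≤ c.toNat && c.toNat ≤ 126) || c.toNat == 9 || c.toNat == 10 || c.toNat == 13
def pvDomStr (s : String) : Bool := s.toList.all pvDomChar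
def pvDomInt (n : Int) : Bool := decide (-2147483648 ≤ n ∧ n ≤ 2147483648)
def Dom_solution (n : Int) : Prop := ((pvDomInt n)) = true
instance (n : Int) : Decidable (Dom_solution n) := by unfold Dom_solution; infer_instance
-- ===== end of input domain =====

-- B replaces A's O(n) DP table with O(log n) binary exponentiation of the 2x2 companion matrix (objective: faster).

-- ===== PORT A =====
-- Literal port of A: dp = [0]*(n+1); dp[2]=3; dp[4]=11; for i in range(6,n+1,2): dp[i]=(4*dp[i-2]-dp[i-4])%MOD; return dp[n].
-- (A's unused local 'answer = 0' is dropped.) pySetD/pyGetD are the total forms of dp[i]=v / dp[i]: under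
-- Pre_solution (4 ≤ n) every index is in range, where they are exactly Python's list assignment / subscript.
def solution (n : Int) : Int :=
  let dp0 : List Int := List.replicate (n + 1).toNat 0
  let dp1 := PySem.List.pySetD dp0 2 3
  let dp2 := PySem.List.pySetD dp1 4 11
  let dp3 := (PySem.List.pyRange 6 (n + 1) 2).foldl
    (fun dp i =>
      PySem.List.pySetD dp i
        (PySem.Int.mod (4 * PySem.List.pyGetD dp (i - 2) 0 - PySem.List.pyGetD dp (i - 4) 0) 1000000007))
    dp2
  PySem.List.pyGetD dp3 n 0

-- ===== PORT B =====
-- mul(X, Y): 2x2 matrix product mod 1e9+7, matrices as 4-tuples (row-major).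
def pvMul (x y : Int × Int × Int × Int) : Int × Int × Int × Int :=
  (PySem.Int.mod (x.1 * y.1 + x.2.1 * y.2.2.1) 1000000007,
   PySem.Int.mod (x.1 * y.2.1 + x.2.1 * y.2.2.2) 1000000007,
   PySem.Int.mod (x.2.2.1 * y.1 + x.2.2.2 * y.2.2.1) 1000000007,
   PySem.Int.mod (x.2.2.1 * y.2.1 + x.2.2.2 * y.2.2.2) 1000000007)

-- the 'while e > 0' loop of Source B ('if e % 2' is Python truthiness, i.e. e % 2 ≠ 0)
def pvPowLoop (e : Int) (r p : Int × Int × Int × Int) : Int × Int × Int × Int :=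
  if 0 < e then
    pvPowLoop (PySem.Int.floordiv e 2)
      (if PySem.Int.mod e 2 ≠ 0 then pvMul r p else r) (pvMul p p)
  else r
termination_by e.toNat
decreasing_by
  rw [PySem.Int.floordiv_eq_ediv_of_pos (by omega : (0:Int) < 2)]
  omega

def solution_alt (n : Int) : Int :=
  if PySem.Int.mod n 2 = 1 then 0
  else
    let k := PySem.Int.floordiv n 2
    let R := pvPowLoop (k - 1) (1, 0, 0, 1) (4, 1000000006, 1, 0)
    PySem.Int.mod (R.1 * 3 + R.2.1 * 1) 1000000007

-- ===== PRECONDITION & SPEC =====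
-- Pre_ excludes exactly the inputs where A raises: for n < 4 the assignments dp[2] = 3 / dp[4] = 11
-- hit an index out of range of [0]*(n+1) and A raises IndexError.
def Pre_solution (n : Int) : Prop := 4 ≤ n
instance (n : Int) : Decidable (Pre_solution n) := by unfold Pre_solution; infer_instance
def pvWitness_solution : Int := (10)

def Spec_solution (n : Int) (out : Int) : Prop := out = solution_alt n
instance (n : Int) (out : Int) : Decidable (Spec_solution n out) := by unfold Spec_solution; infer_instance

-- ===== CLAIM (what is proved, stated in full; the proofs are below) =====
def Claim_equal_solution : Prop := ∀ (n : Int), Dom_solution n → Pre_solution n → Spec_solution n (solution n)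

-- ===== LEMMAS AND PROOFS =====

-- The reduced recurrence: pvR k = number of 3x(2k) tilings mod 1e9+7 (pvR 0 = 1, pvR 1 = 3).
def pvR : Nat → Int
  | 0 => 1
  | 1 => 3
  | (k + 2) => PySem.Int.mod (4 * pvR (k + 1) - pvR k) 1000000007

-- Its image in ZMod 1e9+7 (no reduction needed there).
def pvZ : Nat → ZMod 1000000007
  | 0 => 1
  | 1 => 3
  | (k + 2) => 4 * pvZ (k + 1) - pvZ k

lemma pvCastMod (a : Int) :
    ((PySem.Int.mod a 1000000007 : Int) : ZMod 1000000007) = (a : ZMod 1000000007) := by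
  rw [PySem.Int.mod_eq_emod_of_pos (by omega)]
  exact_mod_cast ZMod.intCast_mod a 1000000007

lemma pvCastInj (a b : Int) (ha : 0 ≤ a) (ha' : a < 1000000007) (hb : 0 ≤ b) (hb' : b < 1000000007)
    (h : (a : ZMod 1000000007) = (b : ZMod 1000000007)) : a = b := by
  have := (ZMod.intCast_eq_intCast_iff a b 1000000007).mp (by exact_mod_cast h)
  have h2 : a % 1000000007 = b % 1000000007 := this
  rw [Int.emod_eq_of_lt ha ha', Int.emod_eq_of_lt hb hb'] at h2
  exact h2

lemma pvR_cast (k : Nat) : ((pvR k : Int) : ZMod 1000000007) = pvZ k := by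
  induction k using pvR.induct with
  | case1 => rfl
  | case2 => rfl
  | case3 k ih1 ih2 =>
    show ((PySem.Int.mod (4 * pvR (k + 1) - pvR k) 1000000007 : Int) : ZMod 1000000007) = _
    rw [pvCastMod]
    push_cast
    rw [ih1, ih2]
    rfl

lemma pvR_bounds (k : Nat) (hk : 2 ≤ k) : 0 ≤ pvR k ∧ pvR k < 1000000007 := by
  match k, hk with
  | (k + 2), _ =>
    exact ⟨PySem.Int.mod_nonneg _ (by omega), PySem.Int.mod_lt _ (by omega)⟩

-- ZMod-side matrix algebra ------------------------------------------------

def pvMulZ (x y : ZMod 1000000007 × ZMod 1000000007 × ZMod 1000000007 × ZMod 1000000007) :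
    ZMod 1000000007 × ZMod 1000000007 × ZMod 1000000007 × ZMod 1000000007 :=
  (x.1 * y.1 + x.2.1 * y.2.2.1, x.1 * y.2.1 + x.2.1 * y.2.2.2,
   x.2.2.1 * y.1 + x.2.2.2 * y.2.2.1, x.2.2.1 * y.2.1 + x.2.2.2 * y.2.2.2)

def pvCast (x : Int × Int × Int × Int) :
    ZMod 1000000007 × ZMod 1000000007 × ZMod 1000000007 × ZMod 1000000007 :=
  ((x.1 : ZMod 1000000007), (x.2.1 : ZMod 1000000007), (x.2.2.1 : ZMod 1000000007), (x.2.2.2 : ZMod 1000000007))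

def pvPowZ (p : ZMod 1000000007 × ZMod 1000000007 × ZMod 1000000007 × ZMod 1000000007) :
    Nat → ZMod 1000000007 × ZMod 1000000007 × ZMod 1000000007 × ZMod 1000000007
  | 0 => (1, 0, 0, 1)
  | (k + 1) => pvMulZ p (pvPowZ p k)

lemma pvCast_mul (x y : Int × Int × Int × Int) : pvCast (pvMul x y) = pvMulZ (pvCast x) (pvCast y) := by
  obtain ⟨a, b, c, d⟩ := x; obtain ⟨e, f, g, h⟩ := y
  simp only [pvMul, pvCast, pvMulZ, pvCastMod]
  push_cast
  rfl

lemma pvMulZ_assoc (x y z : ZMod 1000000007 × ZMod 1000000007 × ZMod 1000000007 × ZMod 1000000007) :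
    pvMulZ (pvMulZ x y) z = pvMulZ x (pvMulZ y z) := by
  obtain ⟨a, b, c, d⟩ := x; obtain ⟨e, f, g, h⟩ := y; obtain ⟨i, j, k, l⟩ := z
  simp only [pvMulZ]
  refine Prod.ext (by ring) (Prod.ext (by ring) (Prod.ext (by ring) (by ring)))

lemma pvMulZ_one_left (x : ZMod 1000000007 × ZMod 1000000007 × ZMod 1000000007 × ZMod 1000000007) :
    pvMulZ (1, 0, 0, 1) x = x := by
  obtain ⟨a, b, c, d⟩ := x
  simp only [pvMulZ]
  refine Prod.ext (by ring) (Prod.ext (by ring) (Prod.ext (by ring) (by ring)))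

lemma pvMulZ_one_right (x : ZMod 1000000007 × ZMod 1000000007 × ZMod 1000000007 × ZMod 1000000007) :
    pvMulZ x (1, 0, 0, 1) = x := by
  obtain ⟨a, b, c, d⟩ := x
  simp only [pvMulZ]
  refine Prod.ext (by ring) (Prod.ext (by ring) (Prod.ext (by ring) (by ring)))

lemma pvPowZ_add (p : ZMod 1000000007 × ZMod 1000000007 × ZMod 1000000007 × ZMod 1000000007)
    (m k : Nat) : pvPowZ p (m + k) = pvMulZ (pvPowZ p m) (pvPowZ p k) := by
  induction m with
  | zero => simp [pvPowZ, pvMulZ_one_left]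
  | succ m ih =>
    have : m + 1 + k = (m + k) + 1 := by omega
    rw [this]
    show pvMulZ p (pvPowZ p (m + k)) = _
    rw [ih]
    show _ = pvMulZ (pvMulZ p (pvPowZ p m)) (pvPowZ p k)
    rw [pvMulZ_assoc]

lemma pvPowZ_sq (p : ZMod 1000000007 × ZMod 1000000007 × ZMod 1000000007 × ZMod 1000000007)
    (k : Nat) : pvPowZ (pvMulZ p p) k = pvPowZ p (2 * k) := by
  induction k with
  | zero => rfl
  | succ k ih =>
    show pvMulZ (pvMulZ p p) (pvPowZ (pvMulZ p p) k) = _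
    rw [ih]
    have : 2 * (k + 1) = 1 + (1 + 2 * k) := by omega
    rw [this, pvPowZ_add, pvPowZ_add, ← pvMulZ_assoc]
    simp [pvPowZ, pvMulZ_one_right]

lemma pvPowLoop_spec (c : Nat) : ∀ (e : Int), e.toNat ≤ c → ∀ (r p : Int × Int × Int × Int),
    pvCast (pvPowLoop e r p) = pvMulZ (pvCast r) (pvPowZ (pvCast p) e.toNat) := by
  induction c with
  | zero =>
    intro e he r p
    rw [pvPowLoop]
    have h0 : ¬ (0 < e) := by omega
    rw [if_neg h0]
    have : e.toNat = 0 := by omega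
    rw [this]
    exact (pvMulZ_one_right _).symm
  | succ c ih =>
    intro e he r p
    rw [pvPowLoop]
    by_cases h0 : 0 < e
    · rw [if_pos h0]
      have hq : PySem.Int.floordiv e 2 = e / 2 := PySem.Int.floordiv_eq_ediv_of_pos (by omega)
      have hm : PySem.Int.mod e 2 = e % 2 := PySem.Int.mod_eq_emod_of_pos (by omega)
      rw [hq, hm]
      have hqc : (e / 2).toNat ≤ c := by omega
      by_cases hodd : e % 2 ≠ 0
      · rw [if_pos hodd]
        rw [ih (e / 2) hqc]
        rw [pvCast_mul, pvCast_mul, pvPowZ_sq]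
        have h2 : 2 * (e / 2).toNat + 1 = e.toNat := by omega
        rw [← h2, pvMulZ_assoc]
        congr 1
      · rw [if_neg hodd]
        rw [ih (e / 2) hqc]
        rw [pvCast_mul, pvPowZ_sq]
        have h2 : 2 * (e / 2).toNat = e.toNat := by omega
        rw [h2]
    · rw [if_neg h0]
      have : e.toNat = 0 := by omega
      rw [this]
      exact (pvMulZ_one_right _).symm

-- Powers of the companion matrix reproduce the recurrence.
lemma pvPowZ_vec (m : Nat) :
    (pvPowZ (4, -1, 1, 0) m).1 * 3 + (pvPowZ (4, -1, 1, 0) m).2.1 = pvZ (m + 1) ∧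
    (pvPowZ (4, -1, 1, 0) m).2.2.1 * 3 + (pvPowZ (4, -1, 1, 0) m).2.2.2 = pvZ m := by
  induction m with
  | zero =>
    constructor
    · show (1 : ZMod 1000000007) * 3 + 0 = pvZ 1
      simp [pvZ]
    · show (0 : ZMod 1000000007) * 3 + 1 = pvZ 0
      simp [pvZ]
  | succ m ih =>
    obtain ⟨ih1, ih2⟩ := ih
    have hz : pvZ (m + 1 + 1) = 4 * pvZ (m + 1) - pvZ m := rfl
    constructor
    · simp only [pvPowZ, pvMulZ]
      rw [hz]
      linear_combination 4 * ih1 - ih2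
    · simp only [pvPowZ, pvMulZ]
      linear_combination ih1

-- B-side final characterisation ---------------------------------------------

lemma pvB_even (n : Int) (hn : 4 ≤ n) (he : n % 2 = 0) :
    0 ≤ solution_alt n ∧ solution_alt n < 1000000007 ∧
    ((solution_alt n : Int) : ZMod 1000000007) = pvZ (n.toNat / 2) := by
  have hm2 : PySem.Int.mod n 2 = 0 := by
    rw [PySem.Int.mod_eq_emod_of_pos (by omega)]; exact he
  have hk : PySem.Int.floordiv n 2 = n / 2 := PySem.Int.floordiv_eq_ediv_of_pos (by omega)
  have hsa : solution_alt n =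
      PySem.Int.mod ((pvPowLoop (n / 2 - 1) (1, 0, 0, 1) (4, 1000000006, 1, 0)).1 * 3 +
        (pvPowLoop (n / 2 - 1) (1, 0, 0, 1) (4, 1000000006, 1, 0)).2.1 * 1) 1000000007 := by
    simp only [solution_alt, hm2, hk]
    norm_num
  refine ⟨by rw [hsa]; exact PySem.Int.mod_nonneg _ (by omega),
          by rw [hsa]; exact PySem.Int.mod_lt _ (by omega), ?_⟩
  have hc := pvPowLoop_spec (n / 2 - 1).toNat (n / 2 - 1) le_rfl (1, 0, 0, 1) (4, 1000000006, 1, 0)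
  have hI : pvCast ((1 : Int), (0 : Int), (0 : Int), (1 : Int)) = (1, 0, 0, 1) := by
    simp only [pvCast]; push_cast; rfl
  have hP : pvCast ((4 : Int), (1000000006 : Int), (1 : Int), (0 : Int)) = (4, -1, 1, 0) := by
    simp only [pvCast]
    have h6 : ((1000000006 : Int) : ZMod 1000000007) = -1 := by decide
    rw [h6]; push_cast; rfl
  rw [hI, hP, pvMulZ_one_left] at hc
  have hvec := pvPowZ_vec (n / 2 - 1).toNat
  have hRc : pvCast (pvPowLoop (n / 2 - 1) (1, 0, 0, 1) (4, 1000000006, 1, 0)) =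
      pvPowZ (4, -1, 1, 0) (n / 2 - 1).toNat := hc
  have h1 : ((pvPowLoop (n / 2 - 1) (1, 0, 0, 1) (4, 1000000006, 1, 0)).1 : ZMod 1000000007) =
      (pvPowZ (4, -1, 1, 0) (n / 2 - 1).toNat).1 := congrArg Prod.fst hRc
  have h2 : ((pvPowLoop (n / 2 - 1) (1, 0, 0, 1) (4, 1000000006, 1, 0)).2.1 : ZMod 1000000007) =
      (pvPowZ (4, -1, 1, 0) (n / 2 - 1).toNat).2.1 := congrArg (fun x => x.2.1) hRc
  have hm : (n / 2 - 1).toNat + 1 = n.toNat / 2 := by omega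
  rw [hsa, pvCastMod]
  push_cast
  rw [h1, h2, ← hm]
  have := hvec.1
  linear_combination this

-- A-side --------------------------------------------------------------------

-- step-2 range induction forms (derived from PySem.List.pyRange_of_pos)
lemma pvRangeTwo_nil (a b : Int) (h : b ≤ a) : PySem.List.pyRange a b 2 = [] := by
  rw [PySem.List.pyRange_of_pos a b (by omega)]
  rw [if_neg (by omega)]
  rfl

lemma pvRangeTwo_cons (a b : Int) (h : a < b) :
    PySem.List.pyRange a b 2 = a :: PySem.List.pyRange (a + 2) b 2 := by
  rw [PySem.List.pyRange_of_pos a b (by omega), PySem.List.pyRange_of_pos (a + 2) b (by omega)]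
  rw [if_pos h]
  by_cases h2 : a + 2 < b
  · rw [if_pos h2]
    have hc : ((b - a + 2 - 1) / 2).toNat = ((b - (a + 2) + 2 - 1) / 2).toNat + 1 := by omega
    rw [hc, List.range_succ_eq_map]
    simp only [List.map_cons, List.map_map]
    congr 1
    · norm_num
    · apply List.map_congr_left
      intro k _
      simp only [Function.comp_apply]
      push_cast
      ring
  · rw [if_neg h2]
    have hc : ((b - a + 2 - 1) / 2).toNat = 1 := by omega
    rw [hc]
    simp

-- the dp table after all writes at indices < a have been made
def pvExp (n : Int) (a : Int) : List Int :=
  (List.range (n + 1).toNat).map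
    (fun (j : Nat) => if j % 2 = 0 ∧ 2 ≤ j ∧ (j : Int) < a then pvR (j / 2) else 0)

lemma pvExp_length (n a : Int) : (pvExp n a).length = (n + 1).toNat := by
  simp [pvExp]

lemma pvExp_getElem (n a : Int) (j : Nat) (hj : j < (n + 1).toNat) :
    (pvExp n a)[j]'(by rw [pvExp_length]; exact hj) =
      if j % 2 = 0 ∧ 2 ≤ j ∧ (j : Int) < a then pvR (j / 2) else 0 := by
  simp [pvExp]

lemma pvExp_congr (n a b : Int) (ha : n < a) (hb : n < b) : pvExp n a = pvExp n b := by
  apply List.ext_getElem (by rw [pvExp_length, pvExp_length])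
  intro j h1 h2
  rw [pvExp_length] at h1
  rw [pvExp_getElem n a j h1, pvExp_getElem n b j h1]
  split_ifs with c1 c2 c2 <;> first | rfl | (exfalso; omega)

lemma pvExp_pyGetD (n a : Int) (i : Int) (h0 : 0 ≤ i) (h1 : i ≤ n) :
    PySem.List.pyGetD (pvExp n a) i 0 =
      if i.toNat % 2 = 0 ∧ 2 ≤ i.toNat ∧ (i.toNat : Int) < a then pvR (i.toNat / 2) else 0 := by
  rw [PySem.List.pyGetD_eq_getElem (pvExp n a) 0 h0 (by rw [pvExp_length]; omega)]
  exact pvExp_getElem n a i.toNat (by omega)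

lemma pvStep (n a : Int) (h6 : 6 ≤ a) (hev : a % 2 = 0) (han : a ≤ n) :
    PySem.List.pySetD (pvExp n a) a
      (PySem.Int.mod (4 * PySem.List.pyGetD (pvExp n a) (a - 2) 0 -
        PySem.List.pyGetD (pvExp n a) (a - 4) 0) 1000000007) = pvExp n (a + 2) := by
  have hg2 : PySem.List.pyGetD (pvExp n a) (a - 2) 0 = pvR ((a - 2).toNat / 2) := by
    rw [pvExp_pyGetD n a (a - 2) (by omega) (by omega)]
    rw [if_pos (by omega)]
  have hg4 : PySem.List.pyGetD (pvExp n a) (a - 4) 0 = pvR ((a - 4).toNat / 2) := by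
    rw [pvExp_pyGetD n a (a - 4) (by omega) (by omega)]
    rw [if_pos (by omega)]
  have h24 : (a - 2).toNat / 2 = (a - 4).toNat / 2 + 1 := by omega
  have hval : PySem.Int.mod (4 * pvR ((a - 4).toNat / 2 + 1) - pvR ((a - 4).toNat / 2)) 1000000007 =
      pvR ((a - 4).toNat / 2 + 2) := rfl
  rw [hg2, hg4, h24, hval]
  rw [PySem.List.pySetD_of_nonneg (pvExp n a) _ (by omega)]
  apply List.ext_getElem (by rw [List.length_set, pvExp_length, pvExp_length])
  intro j h1 h2
  rw [List.getElem_set]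
  rw [pvExp_length] at h2
  rw [pvExp_getElem n (a + 2) j h2]
  by_cases hja : a.toNat = j
  · rw [if_pos hja]
    have hcond : j % 2 = 0 ∧ 2 ≤ j ∧ (j : Int) < a + 2 := by omega
    rw [if_pos hcond]
    have : j / 2 = (a - 4).toNat / 2 + 2 := by omega
    rw [this]
  · rw [if_neg hja]
    rw [pvExp_getElem n a j h2]
    split_ifs with c1 c2 c2 <;> first | rfl | (exfalso; omega)

lemma pvFold (n : Int) : ∀ (c : Nat) (a : Int), 6 ≤ a → a % 2 = 0 → (n + 1 - a).toNat ≤ 2 * c →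
    (PySem.List.pyRange a (n + 1) 2).foldl
      (fun dp i =>
        PySem.List.pySetD dp i
          (PySem.Int.mod (4 * PySem.List.pyGetD dp (i - 2) 0 - PySem.List.pyGetD dp (i - 4) 0) 1000000007))
      (pvExp n a) = pvExp n (n + 1) := by
  intro c
  induction c with
  | zero =>
    intro a h6 hev hf
    rw [pvRangeTwo_nil a (n + 1) (by omega)]
    exact pvExp_congr n a (n + 1) (by omega) (by omega)
  | succ c ih =>
    intro a h6 hev hf
    by_cases hlt : a < n + 1
    · rw [pvRangeTwo_cons a (n + 1) hlt, List.foldl_cons]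
      rw [pvStep n a h6 hev (by omega)]
      exact ih (a + 2) (by omega) (by omega) (by omega)
    · rw [pvRangeTwo_nil a (n + 1) (by omega)]
      exact pvExp_congr n a (n + 1) (by omega) (by omega)

lemma pvInit (n : Int) :
    PySem.List.pySetD (PySem.List.pySetD (List.replicate (n + 1).toNat (0 : Int)) 2 3) 4 11 =
      pvExp n 6 := by
  rw [PySem.List.pySetD_of_nonneg _ _ (by omega : (0:Int) ≤ 2)]
  rw [PySem.List.pySetD_of_nonneg _ _ (by omega : (0:Int) ≤ 4)]
  apply List.ext_getElem
    (by rw [List.length_set, List.length_set, List.length_replicate, pvExp_length])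
  intro j h1 h2
  rw [pvExp_length] at h2
  rw [List.getElem_set, List.getElem_set, List.getElem_replicate]
  rw [pvExp_getElem n 6 j h2]
  have ht2 : (2 : Int).toNat = 2 := rfl
  have ht4 : (4 : Int).toNat = 4 := rfl
  rw [ht2, ht4]
  by_cases h4 : 4 = j
  · subst h4
    rw [if_pos rfl, if_pos (by omega : 4 % 2 = 0 ∧ 2 ≤ 4 ∧ ((4:Nat) : Int) < 6)]
    decide
  · rw [if_neg h4]
    by_cases hj2 : 2 = j
    · subst hj2
      rw [if_pos rfl, if_pos (by omega : 2 % 2 = 0 ∧ 2 ≤ 2 ∧ ((2:Nat) : Int) < 6)]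
      rfl
    · rw [if_neg hj2, if_neg (by omega)]

lemma pvA_eq (n : Int) (hn : 4 ≤ n) :
    solution n = if n % 2 = 0 then pvR (n.toNat / 2) else 0 := by
  show PySem.List.pyGetD
      ((PySem.List.pyRange 6 (n + 1) 2).foldl _
        (PySem.List.pySetD (PySem.List.pySetD (List.replicate (n + 1).toNat (0 : Int)) 2 3) 4 11)) n 0 = _
  rw [pvInit n]
  rw [pvFold n (n + 1 - 6).toNat 6 (by omega) (by omega) (by omega)]
  rw [pvExp_pyGetD n (n + 1) n (by omega) (by omega)]
  by_cases he : n % 2 = 0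
  · rw [if_pos (by omega : n.toNat % 2 = 0 ∧ 2 ≤ n.toNat ∧ ((n.toNat : Int) < n + 1)), if_pos he]
  · rw [if_neg (by omega), if_neg he]

-- ===== VERDICT (by name: the statement is the Claim_ definition above) =====
theorem solution_spec : Claim_equal_solution := by
  intro n _ hpre
  have hn : 4 ≤ n := hpre
  show solution n = solution_alt n
  by_cases he : n % 2 = 0
  · rw [pvA_eq n hn, if_pos he]
    obtain ⟨hb0, hb1, hbc⟩ := pvB_even n hn he
    refine (pvCastInj _ _ hb0 hb1 (pvR_bounds (n.toNat / 2) (by omega)).1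
      (pvR_bounds (n.toNat / 2) (by omega)).2 ?_).symm
    rw [hbc, pvR_cast]
  · rw [pvA_eq n hn, if_neg he]
    have hm : PySem.Int.mod n 2 = 1 := by
      rw [PySem.Int.mod_eq_emod_of_pos (by omega)]; omega
    simp only [solution_alt, hm]
    norm_num
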